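-- pv_equiv track=rewrite | github.com/Anonymize-gitcode/ELSA | smartbugs_curated/key_feature_extract/SWC-108_detect.py | merge_multiline_statements
-- ===== SOURCE A (Python) =====
-- def merge_multiline_statements(lines):
--     """Merge multi-line declarations"""
--     merged_lines = []
--     buffer = ""
--     for line in lines:
--         buffer += line.strip()
--         if line.strip().endswith(";"):
--             merged_lines.append(buffer)
--             buffer = ""
--     if buffer:
--         merged_lines.append(buffer)
--     return merged_lines
-- ===== SOURCE B (Python) =====
-- def merge_multiline_statements(lines):
--     """Merge multi-line declarations: split at terminator lines, then join each slice."""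
--     return _groups([l.strip() for l in lines])
--
--
-- def _groups(ss):
--     for i, s in enumerate(ss):
--         if s.endswith(";"):
--             return ["".join(ss[:i + 1])] + _groups(ss[i + 1:])
--     tail = "".join(ss)
--     return [tail] if tail else []
-- ===== Notes on version B (the rewrite author's own statement) =====
-- stated objective: alternative
-- what changed: A accumulates a running buffer in one fold and flushes it at each ';' line; B strips all lines once, then recursively splits the list at the first ';'-terminated line, emitting each slice as a join, with a truthiness-checked joined tail.
import Mathlib
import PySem

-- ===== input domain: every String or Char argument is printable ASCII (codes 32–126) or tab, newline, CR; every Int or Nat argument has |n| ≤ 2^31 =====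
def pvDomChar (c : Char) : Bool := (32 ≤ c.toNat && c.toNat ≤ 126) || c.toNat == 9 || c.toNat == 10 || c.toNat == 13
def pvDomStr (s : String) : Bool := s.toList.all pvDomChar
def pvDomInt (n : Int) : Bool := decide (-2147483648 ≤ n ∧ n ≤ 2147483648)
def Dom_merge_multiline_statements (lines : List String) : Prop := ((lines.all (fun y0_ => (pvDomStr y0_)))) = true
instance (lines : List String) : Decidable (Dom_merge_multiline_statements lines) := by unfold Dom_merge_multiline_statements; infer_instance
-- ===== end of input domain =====

-- B replaces A's accumulate-and-flush fold by strip-all-lines then recursively split at the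
-- first ';'-terminated line and join each slice (alternative decomposition, same cost).


-- ===== PORT A =====
def merge_multiline_statements (lines : List String) : List String :=
  let st := lines.foldl (fun (st : List String × String) line =>
    let buffer := st.2 ++ PySem.Str.strip line
    if PySem.Str.endswith (PySem.Str.strip line) ";" then (st.1 ++ [buffer], "")
    else (st.1, buffer)) ([], "")
  if st.2 ≠ "" then st.1 ++ [st.2] else st.1

-- ===== PORT B =====
-- the enumerate-scan of _groups: first index whose line ends with ";"
def firstSemi : List String → Option Nat
  | [] => none
  | s :: t => if PySem.Str.endswith s ";" then some 0 else (firstSemi t).map (· + 1)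

-- _groups; the slices ss[:i+1] / ss[i+1:] have nonnegative in-range bounds, exactly take/drop
def groupsB (ss : List String) : List String :=
  match h : firstSemi ss with
  | some i => PySem.Str.join "" (ss.take (i + 1)) :: groupsB (ss.drop (i + 1))
  | none =>
      let tail := PySem.Str.join "" ss
      if tail ≠ "" then [tail] else []
termination_by ss.length
decreasing_by
  cases ss with
  | nil => simp [firstSemi] at h
  | cons a t => simp [List.length_drop]

def merge_multiline_statements_alt (lines : List String) : List String :=
  groupsB (lines.map PySem.Str.strip)

-- ===== PRECONDITION & SPEC =====
def Spec_merge_multiline_statements (lines : List String) (out : List String) : Prop := out = merge_multiline_statements_alt lines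
instance (lines : List String) (out : List String) : Decidable (Spec_merge_multiline_statements lines out) := by unfold Spec_merge_multiline_statements; infer_instance

-- ===== CLAIM (what is proved, stated in full; the proofs are below) =====
def Claim_equal_merge_multiline_statements : Prop := ∀ (lines : List String), Dom_merge_multiline_statements lines → Spec_merge_multiline_statements lines (merge_multiline_statements lines)

-- ===== LEMMAS AND PROOFS =====

-- A's fold step, on the already-stripped line
def stepG (st : List String × String) (s : String) : List String × String :=
  let buffer := st.2 ++ s
  if PySem.Str.endswith s ";" then (st.1 ++ [buffer], "") else (st.1, buffer)

lemma joinNilCons (s : String) (l : List String) :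
    PySem.Str.join "" (s :: l) = s ++ PySem.Str.join "" l := by
  apply String.toList_inj.mp
  cases l with
  | nil => simp [PySem.Str.toList_join, PySem.Chars.join, List.intercalate]
  | cons b t => simp [PySem.Str.toList_join, PySem.Chars.join_cons_cons]

lemma go_eq (ss : List String) (acc : List String) (buf : String) :
    (let st := ss.foldl stepG (acc, buf);
     if st.2 ≠ "" then st.1 ++ [st.2] else st.1)
    = acc ++ (match firstSemi ss with
      | some i => (buf ++ PySem.Str.join "" (ss.take (i + 1))) :: groupsB (ss.drop (i + 1))
      | none => if buf ++ PySem.Str.join "" ss ≠ "" then [buf ++ PySem.Str.join "" ss] else []) := by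
  induction ss generalizing acc buf with
  | nil =>
      show (if buf ≠ "" then acc ++ [buf] else acc) = _
      have hj : PySem.Str.join "" ([] : List String) = "" := rfl
      simp only [firstSemi, hj, String.append_empty]
      split_ifs <;> simp
  | cons s t ih =>
      by_cases hc : PySem.Str.endswith s ";"
      · have hc' : PySem.Chars.endswith s.toList [';'] = true := hc
        have hstep : List.foldl stepG (acc, buf) (s :: t)
            = List.foldl stepG (acc ++ [buf ++ s], "") t := by
          simp [stepG, hc']
        have hfs : firstSemi (s :: t) = some 0 := by simp [firstSemi, hc']
        simp only [hstep, hfs]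
        rw [ih]
        rw [groupsB]
        have hj1 : PySem.Str.join "" ((s :: t).take 1) = s := by
          apply String.toList_inj.mp
          simp [PySem.Str.toList_join, PySem.Chars.join, List.intercalate]
        simp only [hj1, List.drop_succ_cons, List.drop_zero]
        cases hft : firstSemi t with
        | some i => simp [String.empty_append, List.append_assoc]
        | none => split_ifs with h1 <;> simp_all [String.empty_append]
      · have hc' : PySem.Chars.endswith s.toList [';'] = false := by
          simpa [PySem.Str.endswith] using hc
        have hstep : List.foldl stepG (acc, buf) (s :: t)
            = List.foldl stepG (acc, buf ++ s) t := by
          simp [stepG, hc']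
        have hfs : firstSemi (s :: t) = (firstSemi t).map (· + 1) := by simp [firstSemi, hc']
        simp only [hstep, hfs]
        rw [ih]
        cases hft : firstSemi t with
        | some i =>
            simp only [Option.map_some]
            have ht : (s :: t).take (i + 1 + 1) = s :: t.take (i + 1) := rfl
            have hd : (s :: t).drop (i + 1 + 1) = t.drop (i + 1) := rfl
            rw [ht, hd, joinNilCons, ← String.append_assoc]
        | none =>
            simp only [Option.map_none]
            rw [joinNilCons, ← String.append_assoc]

-- ===== VERDICT (by name: the statement is the Claim_ definition above) =====
theorem merge_multiline_statements_spec : Claim_equal_merge_multiline_statements := by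
  intro lines _
  show merge_multiline_statements lines = merge_multiline_statements_alt lines
  unfold merge_multiline_statements merge_multiline_statements_alt
  have hmap : lines.foldl (fun (st : List String × String) line =>
      let buffer := st.2 ++ PySem.Str.strip line
      if PySem.Str.endswith (PySem.Str.strip line) ";" then (st.1 ++ [buffer], "")
      else (st.1, buffer)) ([], "")
      = (lines.map PySem.Str.strip).foldl stepG ([], "") := by
    rw [List.foldl_map]
    rfl
  rw [hmap]
  have := go_eq (lines.map PySem.Str.strip) [] ""
  simp only [List.nil_append] at this
  rw [this, groupsB]
  cases hft : firstSemi (lines.map PySem.Str.strip) with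
  | some i => simp [String.empty_append]
  | none => simp [String.empty_append]
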